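-- pv_equiv track=rewrite | github.com/arkoovx/ArqParse | parsers/xray_parser.py | is_valid_xray_config
-- ===== SOURCE A (Python) =====
-- SUPPORTED_PROTOCOLS = ["vless", "vmess", "trojan", "ss", "ssr", "hysteria", "hysteria2", "hy2", "tuic"]
--
-- def is_valid_xray_config(url: str) -> bool:
--     """Проверяет, является ли строка валидным Xray конфигом."""
--     if not url or not isinstance(url, str):
--         return False
--
--     url_lower = url.lower().strip()
--     for proto in SUPPORTED_PROTOCOLS:
--         if url_lower.startswith(f"{proto}://"):
--             return True
--     return False
-- ===== SOURCE B (Python) =====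
-- SUPPORTED_PROTOCOLS = ["vless", "vmess", "trojan", "ss", "ssr", "hysteria", "hysteria2", "hy2", "tuic"]
-- _SUPPORTED_SET = set(SUPPORTED_PROTOCOLS)
--
-- def is_valid_xray_config(url: str) -> bool:
--     """Проверяет, является ли строка валидным Xray конфигом."""
--     if not url or not isinstance(url, str):
--         return False
--     prefix, sep, _rest = url.lower().strip().partition("://")
--     return sep == "://" and prefix in _SUPPORTED_SET
-- ===== Notes on version B (the rewrite author's own statement) =====
-- stated objective: idiomatic
-- what changed: Replace the loop that tests startswith for each of the nine protocols by a single partition at the first '://' followed by one set-membership lookup of the scheme.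
import Mathlib
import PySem

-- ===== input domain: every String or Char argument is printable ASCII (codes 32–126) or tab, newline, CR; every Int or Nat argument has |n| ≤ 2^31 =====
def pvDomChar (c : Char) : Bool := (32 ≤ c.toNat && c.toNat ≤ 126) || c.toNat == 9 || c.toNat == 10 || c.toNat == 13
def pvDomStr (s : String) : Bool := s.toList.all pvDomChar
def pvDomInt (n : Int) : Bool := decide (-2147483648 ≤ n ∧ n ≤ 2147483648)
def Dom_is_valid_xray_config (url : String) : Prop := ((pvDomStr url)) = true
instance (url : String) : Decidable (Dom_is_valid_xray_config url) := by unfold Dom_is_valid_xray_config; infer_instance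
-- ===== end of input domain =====

-- B replaces A's per-protocol startswith loop by one partition at the first "://" plus a set-membership lookup of the scheme (idiomatic).

-- ===== PORT A =====
def SUPPORTED_PROTOCOLS : List (List Char) :=
  ["vless".toList, "vmess".toList, "trojan".toList, "ss".toList, "ssr".toList,
   "hysteria".toList, "hysteria2".toList, "hy2".toList, "tuic".toList]

def is_valid_xray_config (url : String) : Bool :=
  if url = "" then false
  else
    let url_lower := PySem.Chars.strip (PySem.Chars.lower url.toList)
    SUPPORTED_PROTOCOLS.any (fun proto => PySem.Chars.startswith url_lower (proto ++ "://".toList))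

-- ===== PORT B =====
def pvSupportedSet : PySem.Set (List Char) :=
  PySem.Set.ofList
    ["vless".toList, "vmess".toList, "trojan".toList, "ss".toList, "ssr".toList,
     "hysteria".toList, "hysteria2".toList, "hy2".toList, "tuic".toList]

-- str.partition(sep): split at the FIRST occurrence of sep (located via find), ported by hand (exact for sep ≠ '', which is how B calls it)
def pvPartition (s sep : List Char) : List Char × List Char × List Char :=
  let i := PySem.Chars.find s sep
  if i = -1 then (s, [], [])
  else (s.take i.toNat, sep, s.drop (i.toNat + sep.length))

def is_valid_xray_config_alt (url : String) : Bool :=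
  if url = "" then false
  else
    let s := PySem.Chars.strip (PySem.Chars.lower url.toList)
    let p := pvPartition s "://".toList
    decide (p.2.1 = "://".toList) && PySem.Set.contains pvSupportedSet p.1

-- ===== PRECONDITION & SPEC =====
def Spec_is_valid_xray_config (url : String) (out : Bool) : Prop := out = is_valid_xray_config_alt url
instance (url : String) (out : Bool) : Decidable (Spec_is_valid_xray_config url out) := by unfold Spec_is_valid_xray_config; infer_instance

-- ===== CLAIM (what is proved, stated in full; the proofs are below) =====
def Claim_equal_is_valid_xray_config : Prop := ∀ (url : String), Dom_is_valid_xray_config url → Spec_is_valid_xray_config url (is_valid_xray_config url)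

-- ===== LEMMAS AND PROOFS =====

-- no supported protocol contains ':'
lemma pv_no_colon : ∀ p ∈ SUPPORTED_PROTOCOLS, ':' ∉ p := by decide

-- B's set holds exactly A's protocol list (it is duplicate-free, so set() keeps it as is)
lemma pv_set_eq : pvSupportedSet = SUPPORTED_PROTOCOLS := by decide

-- if some protocol followed by "://" is a prefix of u, the FIRST "://" in u sits right after that protocol
lemma pv_find_of_proto (u p : List Char) (hp : p ∈ SUPPORTED_PROTOCOLS)
    (hpre : (p ++ "://".toList) <+: u) :
    PySem.Chars.find u "://".toList = (p.length : Int) := by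
  obtain ⟨t, ht⟩ := hpre
  rw [List.append_assoc] at ht
  have hocc : "://".toList <+: u.drop p.length := ⟨t, by rw [← ht]; simp⟩
  have hnn : 0 ≤ PySem.Chars.find u "://".toList := by
    rw [PySem.Chars.find_nonneg_iff]
    exact ⟨p, t, by rw [← ht]; simp⟩
  obtain ⟨hfirst, hmin⟩ := PySem.Chars.find_spec (s := u) (sub := "://".toList) hnn
  set k := (PySem.Chars.find u "://".toList).toNat with hk
  have hle : k ≤ p.length := by
    by_contra hgt
    push Not at hgt
    exact hmin p.length hgt hocc
  have hk_eq : k = p.length := by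
    rcases Nat.lt_or_ge k p.length with hlt | hge
    · exfalso
      obtain ⟨r, hr⟩ := hfirst
      have hcolon : u[k]? = some ':' := by
        have h0 : (u.drop k)[0]? = some ':' := by rw [← hr]; rfl
        simpa using h0
      have hpk : p[k]? = some ':' := by
        rw [← ht, List.getElem?_append_left hlt] at hcolon
        exact hcolon
      exact pv_no_colon p hp (List.mem_of_getElem? hpk)
    · omega
  omega

lemma pv_take_of_proto (u p : List Char) (hpre : (p ++ "://".toList) <+: u) :
    u.take p.length = p := by
  obtain ⟨t, ht⟩ := hpre
  rw [List.append_assoc] at ht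
  rw [← ht]
  simp

-- core equivalence on the normalised character list: A's any-loop equals B's partition-and-lookup
lemma pv_core (u : List Char) :
    (SUPPORTED_PROTOCOLS.any (fun proto => PySem.Chars.startswith u (proto ++ "://".toList)))
      = (decide ((pvPartition u "://".toList).2.1 = "://".toList)
          && PySem.Set.contains pvSupportedSet (pvPartition u "://".toList).1) := by
  rw [Bool.eq_iff_iff]
  simp only [List.any_eq_true, Bool.and_eq_true, decide_eq_true_eq,
    PySem.Chars.startswith_iff, PySem.Set.contains, List.contains_iff_mem, pv_set_eq]
  constructor
  · rintro ⟨p, hp, hsw⟩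
    have hf := pv_find_of_proto u p hp hsw
    have htk := pv_take_of_proto u p hsw
    unfold pvPartition
    rw [hf, if_neg (by omega)]
    refine ⟨rfl, ?_⟩
    simpa [htk] using hp
  · rintro ⟨hsep, hmem⟩
    unfold pvPartition at hsep hmem
    by_cases hfind : PySem.Chars.find u "://".toList = -1
    · rw [if_pos hfind] at hsep
      simp at hsep
    · rw [if_neg hfind] at hsep hmem
      have hnn : 0 ≤ PySem.Chars.find u "://".toList := by
        have := PySem.Chars.neg_one_le_find (s := u) (sub := "://".toList)
        omega
      obtain ⟨hpre, -⟩ := PySem.Chars.find_spec (s := u) (sub := "://".toList) hnn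
      obtain ⟨r, hr⟩ := hpre
      set k := (PySem.Chars.find u "://".toList).toNat with hk
      refine ⟨u.take k, hmem, ?_⟩
      exact ⟨r, by rw [List.append_assoc, hr, List.take_append_drop]⟩

-- ===== VERDICT (by name: the statement is the Claim_ definition above) =====
theorem is_valid_xray_config_spec : Claim_equal_is_valid_xray_config := by
  intro url _
  unfold Spec_is_valid_xray_config is_valid_xray_config is_valid_xray_config_alt
  by_cases h : url = ""
  · rw [if_pos h, if_pos h]
  · rw [if_neg h, if_neg h]
    exact pv_core _
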